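-- pv_equiv track=rewrite | github.com/santamaria2525/mon_c2 | operations/hasya_executor.py | _format_folder_range_from_list
-- ===== SOURCE A (Python) =====
-- from typing import Callable, Iterable, List, Optional, Sequence
--
-- def _format_folder_range_from_list(folders: Sequence[str]) -> str:
--     if not folders:
--         return "000-000"
--     try:
--         values = sorted(int(folder) for folder in folders)
--     except Exception:
--         values = [int(folders[0])]
--     return f"{values[0]:03d}-{values[-1]:03d}"
-- ===== SOURCE B (Python) =====
-- def _format_folder_range_from_list(folders):
--     if not folders:
--         return "000-000"
--     try:
--         lo = hi = int(folders[0])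
--         for folder in folders[1:]:
--             v = int(folder)
--             if v < lo:
--                 lo = v
--             if v > hi:
--                 hi = v
--     except Exception:
--         lo = hi = int(folders[0])
--     return f"{lo:03d}-{hi:03d}"
-- ===== Notes on version B (the rewrite author's own statement) =====
-- stated objective: faster
-- what changed: B replaces A's sort of the whole parsed list by a single running min/max scan, keeping the same try/except fallback to int(folders[0]).
import Mathlib
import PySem

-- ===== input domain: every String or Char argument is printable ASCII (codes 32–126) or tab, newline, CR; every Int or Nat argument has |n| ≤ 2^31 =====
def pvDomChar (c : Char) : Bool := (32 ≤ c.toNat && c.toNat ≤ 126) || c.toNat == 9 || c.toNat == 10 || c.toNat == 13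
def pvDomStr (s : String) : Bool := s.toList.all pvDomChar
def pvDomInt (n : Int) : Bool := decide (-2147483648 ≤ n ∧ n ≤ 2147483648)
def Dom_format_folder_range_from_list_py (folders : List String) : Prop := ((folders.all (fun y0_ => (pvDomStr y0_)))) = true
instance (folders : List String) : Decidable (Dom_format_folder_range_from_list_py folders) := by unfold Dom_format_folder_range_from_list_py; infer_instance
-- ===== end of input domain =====

-- B replaces A's sort of all parsed values by a single min/max scan (O(n) instead of O(n log n)).

-- f"{n:03d}" = str(n) zero-padded to width 3 (sign stays in front) — exact via PySem.Str.zfill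
def pvFmt3 (n : Int) : String := PySem.Str.zfill (PySem.Int.toStr n) 3

-- ===== PORT A =====
def format_folder_range_from_list_py (folders : List String) : String :=
  if folders.isEmpty then "000-000"
  else
    -- try: values = sorted(int(folder) for folder in folders); except: values = [int(folders[0])]
    let values : List Int :=
      match folders.mapM PySem.Int.ofStr? with
      | some vs => PySem.List.sorted vs (fun x => x) false
      | none =>
        match PySem.Int.ofStr? ((PySem.List.pyGet? folders 0).getD "") with
        | some v => [v]
        | none => []   -- here Python re-raises ValueError; excluded by Pre_
    -- f"{values[0]:03d}-{values[-1]:03d}"; values ≠ [] whenever Python reaches this line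
    pvFmt3 ((PySem.List.pyGet? values 0).getD 0) ++ "-" ++ pvFmt3 ((PySem.List.pyGet? values (-1)).getD 0)

-- ===== PORT B =====
-- the try-body loop: running min/max over the tail; none = some int(...) raised inside the try
def pvMinMaxLoop : List String → Int → Int → Option (Int × Int)
  | [], lo, hi => some (lo, hi)
  | f :: rest, lo, hi =>
    match PySem.Int.ofStr? f with
    | none => none
    | some v => pvMinMaxLoop rest (if v < lo then v else lo) (if v > hi then v else hi)

def format_folder_range_from_list_py_alt (folders : List String) : String :=
  match folders with
  | [] => "000-000"
  | f0 :: rest =>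
    match PySem.Int.ofStr? f0 with
    | none => ""   -- int(folders[0]) raises in try and again in except; excluded by Pre_
    | some v0 =>
      match pvMinMaxLoop rest v0 v0 with
      | some (lo, hi) => pvFmt3 lo ++ "-" ++ pvFmt3 hi
      | none => pvFmt3 v0 ++ "-" ++ pvFmt3 v0   -- except: lo = hi = int(folders[0])

-- ===== PRECONDITION & SPEC =====
-- Pre_ excludes exactly the inputs where A raises ValueError: a nonempty list whose first
-- element is not int()-convertible (then both try and except branches raise).
def Pre_format_folder_range_from_list_py (folders : List String) : Prop :=
  folders = [] ∨ (PySem.Int.ofStr? (folders.headD "")).isSome = true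
instance (folders : List String) : Decidable (Pre_format_folder_range_from_list_py folders) := by unfold Pre_format_folder_range_from_list_py; infer_instance
def pvWitness_format_folder_range_from_list_py : List String := ["7", "003", "-2"]

def Spec_format_folder_range_from_list_py (folders : List String) (out : String) : Prop := out = format_folder_range_from_list_py_alt folders
instance (folders : List String) (out : String) : Decidable (Spec_format_folder_range_from_list_py folders out) := by unfold Spec_format_folder_range_from_list_py; infer_instance

-- ===== CLAIM (what is proved, stated in full; the proofs are below) =====
def Claim_equal_format_folder_range_from_list_py : Prop := ∀ (folders : List String), Dom_format_folder_range_from_list_py folders → Pre_format_folder_range_from_list_py folders → Spec_format_folder_range_from_list_py folders (format_folder_range_from_list_py folders)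

-- ===== LEMMAS AND PROOFS =====

-- if every tail element parses, the B loop returns the running min/max of the parsed values
theorem pvMinMaxLoop_some (rest : List String) (vs : List Int) (lo hi : Int)
    (h : rest.mapM PySem.Int.ofStr? = some vs) :
    pvMinMaxLoop rest lo hi = some (vs.foldl min lo, vs.foldl max hi) := by
  induction rest generalizing vs lo hi with
  | nil => simp_all [pvMinMaxLoop]
  | cons f rest ih =>
    simp only [List.mapM_cons, Option.bind_eq_bind, Option.bind_eq_some_iff] at h
    obtain ⟨v, hv, vs', hvs', hvs⟩ := h
    simp only [pure, Option.some.injEq] at hvs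
    subst hvs
    simp only [pvMinMaxLoop, hv]
    rw [ih vs' _ _ hvs']
    have hmin : (if v < lo then v else lo) = min lo v := by split <;> omega
    have hmax : (if v > hi then v else hi) = max hi v := by split <;> omega
    simp [List.foldl_cons, hmin, hmax]

-- if some tail element fails to parse, the B loop returns none
theorem pvMinMaxLoop_none (rest : List String) (lo hi : Int)
    (h : rest.mapM PySem.Int.ofStr? = none) :
    pvMinMaxLoop rest lo hi = none := by
  induction rest generalizing lo hi with
  | nil => simp_all
  | cons f rest ih =>
    simp only [List.mapM_cons, Option.bind_eq_bind, Option.bind_eq_none_iff] at h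
    cases hv : PySem.Int.ofStr? f with
    | none => simp [pvMinMaxLoop, hv]
    | some v =>
      simp only [pvMinMaxLoop, hv]
      cases hr : rest.mapM PySem.Int.ofStr? with
      | none => exact ih _ _ hr
      | some a => simpa [pure] using h v hv a hr

-- in a (·≤·)-pairwise list every element is at most the last one
theorem pvPairwise_le_getLast : ∀ (l : List Int), l.Pairwise (· ≤ ·) → ∀ (h : l ≠ []),
    ∀ y ∈ l, y ≤ l.getLast h := by
  intro l
  induction l with
  | nil => intro _ h; simp at h
  | cons x t ih =>
    intro hp h y hy
    cases t with
    | nil => simp_all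
    | cons z t' =>
      rw [List.getLast_cons (by simp)]
      rcases List.mem_cons.mp hy with rfl | hyt
      · exact List.rel_of_pairwise_cons hp (List.getLast_mem (by simp))
      · exact ih hp.of_cons (by simp) y hyt

-- head of sorted(v0 :: vs) is the running minimum
theorem pvSortedHead (v0 : Int) (vs : List Int) :
    ((PySem.List.pyGet? (PySem.List.sorted (v0 :: vs) (fun x => x) false) 0).getD 0) = vs.foldl min v0 := by
  cases hs : PySem.List.sorted (v0 :: vs) (fun x => x) false with
  | nil => exact absurd ((PySem.List.sorted_eq_nil_iff _ _ _).mp hs) (by simp)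
  | cons m t =>
    rw [PySem.List.pyGet?_zero_cons, Option.getD_some]
    have hmem : m ∈ v0 :: vs := (PySem.List.mem_sorted _ _ _ _).mp (hs ▸ List.mem_cons_self)
    have hle : ∀ y ∈ v0 :: vs, m ≤ y := PySem.List.key_head_sorted_le (v0 :: vs) (fun x => x) hs
    have hf := PySem.List.foldl_min_le vs v0
    apply le_antisymm
    · rcases PySem.List.foldl_min_mem vs v0 with he | hm
      · rw [he]; exact hle v0 List.mem_cons_self
      · exact hle _ (List.mem_cons_of_mem _ hm)
    · rcases List.mem_cons.mp hmem with rfl | hm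
      · exact hf.1
      · exact hf.2 m hm

-- last of sorted(v0 :: vs) is the running maximum
theorem pvSortedLast (v0 : Int) (vs : List Int) :
    ((PySem.List.pyGet? (PySem.List.sorted (v0 :: vs) (fun x => x) false) (-1)).getD 0) = vs.foldl max v0 := by
  have hne : PySem.List.sorted (v0 :: vs) (fun x => x) false ≠ [] := by
    simp [PySem.List.sorted_eq_nil_iff]
  rw [PySem.List.pyGet?_neg_one, List.getLast?_eq_some_getLast hne, Option.getD_some]
  have hp : (PySem.List.sorted (v0 :: vs) (fun x => x) false).Pairwise (· ≤ ·) := by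
    simpa using PySem.List.sorted_pairwise (v0 :: vs) (fun x => x)
  have hlast := List.getLast_mem hne
  have hmem : (PySem.List.sorted (v0 :: vs) (fun x => x) false).getLast hne ∈ v0 :: vs :=
    (PySem.List.mem_sorted _ _ _ _).mp hlast
  have hge : ∀ y ∈ v0 :: vs, y ≤ (PySem.List.sorted (v0 :: vs) (fun x => x) false).getLast hne := by
    intro y hy
    exact pvPairwise_le_getLast _ hp hne y ((PySem.List.mem_sorted _ _ _ _).mpr hy)
  have hf := PySem.List.le_foldl_max vs v0
  apply le_antisymm
  · rcases List.mem_cons.mp hmem with heq | hm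
    · rw [heq]; exact hf.1
    · exact hf.2 _ hm
  · rcases PySem.List.foldl_max_mem vs v0 with he | hm
    · rw [he]; exact hge v0 List.mem_cons_self
    · exact hge _ (List.mem_cons_of_mem _ hm)

-- ===== VERDICT (by name: the statement is the Claim_ definition above) =====
theorem format_folder_range_from_list_py_spec : Claim_equal_format_folder_range_from_list_py := by
  intro folders _ hpre
  unfold Spec_format_folder_range_from_list_py
  cases folders with
  | nil => rfl
  | cons f0 rest =>
    have hv0 : ∃ v0, PySem.Int.ofStr? f0 = some v0 := by
      rcases hpre with h | h
      · exact absurd h (by simp)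
      · simpa [Option.isSome_iff_exists] using h
    obtain ⟨v0, hv0⟩ := hv0
    cases hm : rest.mapM PySem.Int.ofStr? with
    | some vs' =>
      have hall : (f0 :: rest).mapM PySem.Int.ofStr? = some (v0 :: vs') := by
        simp [List.mapM_cons, hv0, hm, pure]
      simp only [format_folder_range_from_list_py, format_folder_range_from_list_py_alt,
        List.isEmpty_cons, Bool.false_eq_true, if_false, hall, hv0,
        pvMinMaxLoop_some rest vs' v0 v0 hm, pvSortedHead, pvSortedLast]
    | none =>
      have hall : (f0 :: rest).mapM PySem.Int.ofStr? = none := by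
        simp [List.mapM_cons, hv0, hm]
      simp only [format_folder_range_from_list_py, format_folder_range_from_list_py_alt,
        List.isEmpty_cons, Bool.false_eq_true, if_false, hall, hv0,
        pvMinMaxLoop_none rest v0 v0 hm, PySem.List.pyGet?_zero_cons, Option.getD_some,
        PySem.List.pyGet?_neg_one, List.getLast?_singleton]
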